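-- pv_equiv track=rewrite | github.com/rtverhey-cmd/skinsignal | signal_scraper.py | count_intent
-- ===== SOURCE A (Python) =====
-- INTENT_PHRASES = [
--     "where to buy", "where can i buy", "link?", "asin?",
--     "amazon link", "just ordered", "just bought", "in my cart",
--     "is this on amazon", "sephora link", "where did you get",
-- ]
--
-- def count_intent(comments):
--     count = 0
--     for comment in comments:
--         body = comment.lower()
--         for phrase in INTENT_PHRASES:
--             if phrase in body:
--                 count += 1
--                 break
--     return count
-- ===== SOURCE B (Python) =====
-- # B: single left-to-right scan per comment with a first-character dispatch table
-- # (phrases bucketed by first letter, prefix-tested at each position) instead of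
-- # one substring search per phrase; same count, alternative algorithm.
-- INTENT_PHRASES = [
--     "where to buy", "where can i buy", "link?", "asin?",
--     "amazon link", "just ordered", "just bought", "in my cart",
--     "is this on amazon", "sephora link", "where did you get",
-- ]
--
-- _BY_FIRST = {}
-- for _p in INTENT_PHRASES:
--     _BY_FIRST.setdefault(_p[0], []).append(_p)
--
--
-- def _has_intent(body):
--     for i, ch in enumerate(body):
--         for p in _BY_FIRST.get(ch, ()):
--             if body.startswith(p, i):
--                 return True
--     return False
--
--
-- def count_intent(comments):
--     count = 0
--     for comment in comments:
--         if _has_intent(comment.lower()):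
--             count += 1
--     return count
-- ===== Notes on version B (the rewrite author's own statement) =====
-- stated objective: alternative
-- what changed: A searches each comment once per phrase with the substring operator; B scans each comment once left to right, dispatching on the current character through a first-letter bucket table built once from the phrases and prefix-testing only the phrases in that bucket.
import Mathlib
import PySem

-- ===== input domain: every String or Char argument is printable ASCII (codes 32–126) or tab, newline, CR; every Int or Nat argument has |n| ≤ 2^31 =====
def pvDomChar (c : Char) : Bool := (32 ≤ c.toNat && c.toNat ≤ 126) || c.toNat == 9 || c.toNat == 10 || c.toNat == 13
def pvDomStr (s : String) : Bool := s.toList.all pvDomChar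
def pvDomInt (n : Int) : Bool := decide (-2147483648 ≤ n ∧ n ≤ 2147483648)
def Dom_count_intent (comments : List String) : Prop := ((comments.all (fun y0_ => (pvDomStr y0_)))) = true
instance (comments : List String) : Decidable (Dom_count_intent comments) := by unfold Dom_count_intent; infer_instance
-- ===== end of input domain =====

-- B replaces A's per-phrase substring searches by a single left-to-right scan with a
-- first-letter dispatch table (alternative algorithm, same count).

-- ===== PORT A =====
def intentPhrases : List String := [
  "where to buy", "where can i buy", "link?", "asin?",
  "amazon link", "just ordered", "just bought", "in my cart",
  "is this on amazon", "sephora link", "where did you get"]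

-- A's inner 'for phrase in INTENT_PHRASES: if phrase in body: count += 1; break'
def innerA (body : String) : List String → Int → Int
  | [], count => count
  | p :: rest, count =>
      if PySem.Str.isIn p body then count + 1 else innerA body rest count

def count_intent (comments : List String) : Int :=
  comments.foldl (fun count comment => innerA (PySem.Str.lower comment) intentPhrases count) 0

-- ===== PORT B =====
-- the module-level '_BY_FIRST' table: setdefault(p[0], []).append(p)
def byFirst : PySem.Dict Char (List String) :=
  intentPhrases.foldl (fun d p =>
    let c := p.toList.headD ' '     -- p[0]; every phrase is nonempty
    d.insert c (d.getD c [] ++ [p])) PySem.Dict.empty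

-- '_has_intent': for i, ch in enumerate(body): for p in _BY_FIRST.get(ch, ()): if body.startswith(p, i): return True
-- body.startswith(p, i) with 0 ≤ i is exactly 'p is a prefix of body[i:]', ported as startswith (body.drop i) p
def hasIntent (body : List Char) : Bool :=
  (List.range body.length).any fun i =>
    (byFirst.getD (body.getD i ' ') []).any fun p =>
      PySem.Chars.startswith (body.drop i) p.toList

def count_intent_alt (comments : List String) : Int :=
  comments.foldl (fun count comment =>
    count + (if hasIntent (PySem.Chars.lower comment.toList) then 1 else 0)) 0

-- ===== PRECONDITION & SPEC =====
def Spec_count_intent (comments : List String) (out : Int) : Prop := out = count_intent_alt comments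
instance (comments : List String) (out : Int) : Decidable (Spec_count_intent comments out) := by unfold Spec_count_intent; infer_instance

-- ===== CLAIM (what is proved, stated in full; the proofs are below) =====
def Claim_equal_count_intent : Prop := ∀ (comments : List String), Dom_count_intent comments → Spec_count_intent comments (count_intent comments)

-- ===== LEMMAS AND PROOFS =====

-- every bucket entry is a (nonempty) phrase
theorem bucket_sound (c : Char) (p : String) (h : p ∈ byFirst.getD c []) :
    p ∈ intentPhrases ∧ p.toList ≠ [] := by
  have e : byFirst = PySem.Dict.mk [
    ('w', ["where to buy", "where can i buy", "where did you get"]),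
    ('l', ["link?"]),
    ('a', ["asin?", "amazon link"]),
    ('j', ["just ordered", "just bought"]),
    ('i', ["in my cart", "is this on amazon"]),
    ('s', ["sephora link"])] := by decide
  rw [e] at h
  simp only [PySem.Dict.getD, PySem.Dict.get?_mk_cons] at h
  split_ifs at h <;>
    simp only [PySem.Dict.get?, Option.getD, List.mem_cons, List.not_mem_nil, or_false] at h <;>
    rcases h with rfl | h <;> first | decide | (rcases h with rfl | h <;> first | decide | (rcases h with rfl; decide))

-- every phrase sits in the bucket of its first letter
theorem bucket_complete (p : String) (hp : p ∈ intentPhrases) :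
    p ∈ byFirst.getD (p.toList.headD ' ') [] := by
  fin_cases hp <;> decide

theorem hasIntent_iff (L : List Char) :
    hasIntent L = true ↔ ∃ p ∈ intentPhrases, PySem.Chars.isIn p.toList L = true := by
  constructor
  · intro h
    simp only [hasIntent, List.any_eq_true, List.mem_range] at h
    obtain ⟨i, _, p, hpb, hsw⟩ := h
    obtain ⟨hpm, _⟩ := bucket_sound _ _ hpb
    refine ⟨p, hpm, ?_⟩
    rw [← PySem.Chars.exists_prefix_drop_iff_isIn]
    exact ⟨i, (PySem.Chars.startswith_iff _ _).1 hsw⟩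
  · rintro ⟨p, hpm, hin⟩
    obtain ⟨j, hj⟩ := (PySem.Chars.exists_prefix_drop_iff_isIn p.toList L).2 hin
    have hne : p.toList ≠ [] := by fin_cases hpm <;> decide
    obtain ⟨t, ht⟩ := hj
    have hdne : L.drop j ≠ [] := by
      intro h0; rw [h0] at ht; exact hne (List.append_eq_nil_iff.1 ht).1
    have hjlt : j < L.length := by
      by_contra hge
      exact hdne (List.drop_eq_nil_of_le (le_of_not_gt hge))
    have hhead : L.getD j ' ' = p.toList.headD ' ' := by
      rcases hc : p.toList with _ | ⟨a, l⟩
      · exact absurd hc hne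
      · rw [hc] at ht
        rw [List.getD_eq_getElem?_getD, ← List.head?_drop, ← ht]
        simp
    simp only [hasIntent, List.any_eq_true, List.mem_range]
    refine ⟨j, hjlt, p, ?_, ?_⟩
    · rw [hhead]; exact bucket_complete p hpm
    · exact (PySem.Chars.startswith_iff _ _).2 ⟨t, ht⟩

theorem innerA_eq (body : String) (ps : List String) (count : Int) :
    innerA body ps count =
      count + (if ps.any (fun p => PySem.Str.isIn p body) then 1 else 0) := by
  induction ps generalizing count with
  | nil => simp [innerA]
  | cons p rest ih =>
    by_cases h : PySem.Chars.isIn p.toList body.toList = true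
    · simp [innerA, h]
    · simp [innerA, h, ih]

theorem step_eq (count : Int) (comment : String) :
    innerA (PySem.Str.lower comment) intentPhrases count =
      count + (if hasIntent (PySem.Chars.lower comment.toList) then 1 else 0) := by
  rw [innerA_eq]
  congr 1
  have : (intentPhrases.any fun p => PySem.Str.isIn p (PySem.Str.lower comment)) =
      hasIntent (PySem.Chars.lower comment.toList) := by
    rcases hb : hasIntent (PySem.Chars.lower comment.toList) with _ | _
    · rw [List.any_eq_false]
      intro p hp hIn
      have : hasIntent (PySem.Chars.lower comment.toList) = true := by
        rw [hasIntent_iff]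
        refine ⟨p, hp, ?_⟩
        have := hIn
        simpa [PySem.Str.isIn] using hIn
      rw [hb] at this; exact Bool.false_ne_true this
    · rw [List.any_eq_true]
      obtain ⟨p, hp, hin⟩ := (hasIntent_iff _).1 hb
      exact ⟨p, hp, by simpa [PySem.Str.isIn] using hin⟩
  rw [this]

theorem fold_eq (comments : List String) (acc : Int) :
    comments.foldl (fun count comment => innerA (PySem.Str.lower comment) intentPhrases count) acc =
    comments.foldl (fun count comment =>
      count + (if hasIntent (PySem.Chars.lower comment.toList) then 1 else 0)) acc := by
  induction comments generalizing acc with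
  | nil => rfl
  | cons c cs ih => simp only [List.foldl_cons, step_eq]

-- ===== VERDICT (by name: the statement is the Claim_ definition above) =====
theorem count_intent_spec : Claim_equal_count_intent := by
  intro comments _
  unfold Spec_count_intent count_intent count_intent_alt
  exact fold_eq comments 0
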